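-- pv_equiv track=rewrite | github.com/m0ksem/python-topic-1 | py/lib/tetradic.py | get_tetradic_number_indexes
-- ===== SOURCE A (Python) =====
-- def make_tetradic_number(index: int) -> int:
--   return (index * (index + 1) * (index + 2)) // 6
--
-- def get_tetradic_number_indexes(number: int) -> int:
--   indexes = []
--   index = 0
--
--   while True:
--     tetradic_number = make_tetradic_number(index)
--
--     if tetradic_number >= number:
--       break
--
--     index += 1
--     indexes.append(index)
--
--   return indexes
-- ===== SOURCE B (Python) =====
-- def _tet(i: int) -> int:
--   return (i * (i + 1) * (i + 2)) // 6
--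
--
-- def get_tetradic_number_indexes(number: int) -> int:
--   # Binary search for k = smallest index with tetradic(k) >= number,
--   # then emit 1..k directly.
--   if number <= 0:
--     return []
--   hi = 1
--   while _tet(hi) < number:
--     hi *= 2
--   lo = 0
--   while lo < hi:
--     mid = (lo + hi) // 2
--     if _tet(mid) >= number:
--       hi = mid
--     else:
--       lo = mid + 1
--   return list(range(1, lo + 1))
-- ===== Notes on version B (the rewrite author's own statement) =====
-- stated objective: alternative
-- what changed: Replaced the one-at-a-time while-loop scan for the stopping index with an exponential-doubling upper bound plus binary search, building the result directly as range(1, k+1); the search uses O(log k) tetradic evaluations instead of O(k), though both are dominated by the O(k) output list.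
import Mathlib
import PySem

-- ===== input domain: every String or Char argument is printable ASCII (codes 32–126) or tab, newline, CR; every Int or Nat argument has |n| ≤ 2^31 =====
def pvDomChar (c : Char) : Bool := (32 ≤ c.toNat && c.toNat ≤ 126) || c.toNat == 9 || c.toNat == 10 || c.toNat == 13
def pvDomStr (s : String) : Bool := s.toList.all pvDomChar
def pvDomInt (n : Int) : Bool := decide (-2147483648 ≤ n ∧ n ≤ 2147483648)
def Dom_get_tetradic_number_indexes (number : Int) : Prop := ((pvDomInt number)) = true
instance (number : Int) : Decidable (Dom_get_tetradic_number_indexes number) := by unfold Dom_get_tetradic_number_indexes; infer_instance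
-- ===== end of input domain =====

-- B replaces A's one-at-a-time scan for the stopping index with doubling + binary search,
-- emitting the result directly as range(1, k+1); return values agree on all inputs.

-- ===== PORT A =====
def make_tetradic_number (index : Int) : Int :=
  PySem.Int.floordiv (index * (index + 1) * (index + 2)) 6

-- termination lemma for A's while-loop: the tetradic number dominates its index
theorem pv_tet_ge_self (i : Int) (h : 0 ≤ i) :
    i ≤ PySem.Int.floordiv (i * (i + 1) * (i + 2)) 6 := by
  rw [PySem.Int.le_floordiv_iff_mul_le (by norm_num)]
  rcases (by omega : i = 0 ∨ 1 ≤ i) with h1 | h1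
  · simp [h1]
  · nlinarith [mul_nonneg (mul_nonneg h (show (0:ℤ) ≤ i + 4 by omega)) (show (0:ℤ) ≤ i - 1 by omega)]

-- the 'while True' loop of A: state (index, indexes); 0 ≤ index is the loop invariant
def pvLoopA (number index : Int) (indexes : List Int) (h : 0 ≤ index) : List Int :=
  if _hbrk : make_tetradic_number index ≥ number then indexes
  else pvLoopA number (index + 1) (indexes ++ [index + 1]) (by omega)
termination_by (number - index).toNat
decreasing_by
  have h1 := pv_tet_ge_self index h
  simp only [make_tetradic_number, ge_iff_le, not_le] at *
  omega

def get_tetradic_number_indexes (number : Int) : List Int :=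
  pvLoopA number 0 [] (by norm_num)

-- ===== PORT B =====
def pvTetAlt (i : Int) : Int :=
  PySem.Int.floordiv (i * (i + 1) * (i + 2)) 6

-- 'while _tet(hi) < number: hi *= 2'
def pvGrow (number hi : Int) (h : 0 < hi) : Int :=
  if pvTetAlt hi < number then pvGrow number (hi * 2) (by omega) else hi
termination_by (number - hi).toNat
decreasing_by
  have h1 := pv_tet_ge_self hi h.le
  simp only [pvTetAlt] at *
  omega

-- 'while lo < hi: mid = (lo+hi)//2; …'
def pvBisect (number lo hi : Int) : Int :=
  if h2 : lo < hi then
    let mid := PySem.Int.floordiv (lo + hi) 2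
    if pvTetAlt mid ≥ number then pvBisect number lo mid
    else pvBisect number (mid + 1) hi
  else lo
termination_by (hi - lo).toNat
decreasing_by
  · have hb := PySem.Int.floordiv_two_mid_bounds (lo := lo) (hi := hi) h2.le
    have hlt : PySem.Int.floordiv (lo + hi) 2 < hi := by
      rw [PySem.Int.floordiv_lt_iff_lt_mul (by norm_num)]; omega
    omega
  · have hb := PySem.Int.floordiv_two_mid_bounds (lo := lo) (hi := hi) h2.le
    omega

def get_tetradic_number_indexes_alt (number : Int) : List Int :=
  if number ≤ 0 then []
  else
    let hi := pvGrow number 1 (by norm_num)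
    let lo := pvBisect number 0 hi
    PySem.List.pyRange 1 (lo + 1) 1

-- ===== PRECONDITION & SPEC =====
def Spec_get_tetradic_number_indexes (number : Int) (out : List Int) : Prop := out = get_tetradic_number_indexes_alt number
instance (number : Int) (out : List Int) : Decidable (Spec_get_tetradic_number_indexes number out) := by unfold Spec_get_tetradic_number_indexes; infer_instance

-- ===== CLAIM (what is proved, stated in full; the proofs are below) =====
def Claim_equal_get_tetradic_number_indexes : Prop := ∀ (number : Int), Dom_get_tetradic_number_indexes number → Spec_get_tetradic_number_indexes number (get_tetradic_number_indexes number)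

-- ===== LEMMAS AND PROOFS =====

theorem pvTetAlt_eq (i : Int) : pvTetAlt i = make_tetradic_number i := rfl

theorem pv_tet_mono (i j : Int) (h0 : 0 ≤ i) (hij : i ≤ j) :
    make_tetradic_number i ≤ make_tetradic_number j := by
  unfold make_tetradic_number
  rw [PySem.Int.le_floordiv_iff_mul_le (by norm_num)]
  have h1 : 0 ≤ PySem.Int.mod (i * (i + 1) * (i + 2)) 6 := by
    rw [PySem.Int.mod_eq_emod_of_pos (by norm_num)]
    exact Int.emod_nonneg _ (by norm_num)
  have h2 := PySem.Int.floordiv_mul_add_mod (i * (i + 1) * (i + 2)) 6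
  have hP : i * (i + 1) * (i + 2) ≤ j * (j + 1) * (j + 2) := by
    have hin : i * (i + 1) ≤ j * (j + 1) :=
      mul_le_mul hij (by omega) (by omega) (by omega)
    exact mul_le_mul hin (by omega) (by omega) (mul_nonneg (by omega) (by omega))
  linarith

-- characterization of A's loop: it returns acc ++ [index+1, …, k] where k is the
-- first index ≥ index whose tetradic number reaches `number`
theorem pvLoopA_spec (number index : Int) (acc : List Int) (h : 0 ≤ index) :
    (∀ j, 0 ≤ j → j < index → make_tetradic_number j < number) →
    ∃ k, index ≤ k ∧ number ≤ make_tetradic_number k ∧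
      (∀ j, 0 ≤ j → j < k → make_tetradic_number j < number) ∧
      pvLoopA number index acc h = acc ++ PySem.List.pyRange (index + 1) (k + 1) 1 := by
  fun_induction pvLoopA number index acc h with
  | case1 index acc h hbrk =>
    intro hprev
    refine ⟨index, le_refl _, hbrk, hprev, ?_⟩
    rw [PySem.List.pyRange_one_eq_nil (by omega), List.append_nil]
  | case2 index acc h hbrk ih =>
    intro hprev
    have hbrk' : make_tetradic_number index < number := lt_of_not_ge hbrk
    obtain ⟨k, hk1, hk2, hk3, hk4⟩ := ih (by
      intro j hj0 hj
      rcases lt_or_ge j index with hj' | hj'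
      · exact hprev j hj0 hj'
      · have hje : j = index := by omega
        exact hje ▸ hbrk')
    refine ⟨k, by omega, hk2, hk3, ?_⟩
    rw [hk4, List.append_assoc]
    simp only [List.singleton_append]
    rw [← PySem.List.pyRange_one_cons (by omega)]

theorem pvGrow_spec (number hi : Int) (h : 0 < hi) :
    0 < pvGrow number hi h ∧ number ≤ pvTetAlt (pvGrow number hi h) := by
  fun_induction pvGrow number hi h with
  | case1 hi h hlt ih => exact ih
  | case2 hi h hlt => exact ⟨h, by omega⟩

theorem pvBisect_spec (number lo hi : Int) :
    0 ≤ lo → lo ≤ hi → number ≤ pvTetAlt hi →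
    (∀ j, 0 ≤ j → j < lo → pvTetAlt j < number) →
    0 ≤ pvBisect number lo hi ∧ number ≤ pvTetAlt (pvBisect number lo hi) ∧
      ∀ j, 0 ≤ j → j < pvBisect number lo hi → pvTetAlt j < number := by
  fun_induction pvBisect number lo hi with
  | case1 lo hi h2 mid hge ih =>
    intro h0 hle hhi hlo
    have hmid : mid = PySem.Int.floordiv (lo + hi) 2 := rfl
    have hb := PySem.Int.floordiv_two_mid_bounds (lo := lo) (hi := hi) h2.le
    exact ih h0 (by omega) hge hlo
  | case2 lo hi h2 mid hge ih =>
    intro h0 hle hhi hlo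
    have hge' : pvTetAlt mid < number := lt_of_not_ge hge
    have hmid : mid = PySem.Int.floordiv (lo + hi) 2 := rfl
    have hb := PySem.Int.floordiv_two_mid_bounds (lo := lo) (hi := hi) h2.le
    refine ih (by omega) ?_ hhi ?_
    · have hlt : PySem.Int.floordiv (lo + hi) 2 < hi := by
        rw [PySem.Int.floordiv_lt_iff_lt_mul (by norm_num)]; omega
      omega
    · intro j hj0 hj
      rcases lt_or_ge j lo with hj' | hj'
      · exact hlo j hj0 hj'
      · calc pvTetAlt j ≤ pvTetAlt mid := by
              rw [pvTetAlt_eq, pvTetAlt_eq]; exact pv_tet_mono _ _ hj0 (by omega)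
          _ < number := hge'
  | case3 lo hi h2 =>
    intro h0 hle hhi hlo
    have hlh : lo = hi := by omega
    exact ⟨h0, hlh ▸ hhi, hlo⟩

theorem pv_tet_zero : make_tetradic_number 0 = 0 := by decide

-- ===== VERDICT (by name: the statement is the Claim_ definition above) =====
theorem get_tetradic_number_indexes_spec : Claim_equal_get_tetradic_number_indexes := by
  intro number _
  unfold Spec_get_tetradic_number_indexes get_tetradic_number_indexes get_tetradic_number_indexes_alt
  obtain ⟨k, hk1, hk2, hk3, hk4⟩ :=
    pvLoopA_spec number 0 [] (by norm_num) (by intro j hj0 hj; omega)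
  rw [hk4, List.nil_append]
  by_cases hn : number ≤ 0
  · rw [if_pos hn]
    have hk0 : k = 0 := by
      by_contra hne
      have := hk3 0 le_rfl (by omega)
      rw [pv_tet_zero] at this; omega
    rw [hk0, PySem.List.pyRange_one_eq_nil (by norm_num)]
  · rw [if_neg hn]
    obtain ⟨hg0, hg1⟩ := pvGrow_spec number 1 (by norm_num)
    obtain ⟨hb0, hb1, hb2⟩ :=
      pvBisect_spec number 0 (pvGrow number 1 (by norm_num)) le_rfl hg0.le hg1
        (by intro j hj0 hj; omega)
    have hkeq : k = pvBisect number 0 (pvGrow number 1 (by norm_num)) := by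
      rcases lt_trichotomy k (pvBisect number 0 (pvGrow number 1 (by norm_num))) with hc | hc | hc
      · have := hb2 k (by omega) hc
        rw [pvTetAlt_eq] at this; omega
      · exact hc
      · have := hk3 (pvBisect number 0 (pvGrow number 1 (by norm_num))) hb0 hc
        rw [pvTetAlt_eq] at hb1; omega
    simp only [hkeq]
    norm_num
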